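-- pv_equiv track=rewrite | github.com/annabavaresco/pstrentino | docker-compose/api/functions_lm.py | comp_piu_gravi
-- ===== SOURCE A (Python) =====
-- def comp_piu_gravi(colore, attesa):
--     #dato un oggetto della classe ospedale, calcola quanti pazienti in attesa sono più gravi
--     # di quello del parametro 'colore'
--     col_list = ['verde', 'azzurro', 'arancio', 'rosso']
--     res = 0
--     if colore == 'bianco':
--         for c in col_list:
--             res += attesa[c]
--     elif colore == 'verde':
--         for c in col_list[1:]:
--             res += attesa[c]
--     elif colore == 'azzurro':
--         for c in col_list[2:]:
--             res += attesa[c]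
--     elif colore == 'arancio':
--         res += attesa['rosso']
--     return res
-- ===== SOURCE B (Python) =====
-- def comp_piu_gravi(colore, attesa):
--     rank = {'bianco': 0, 'verde': 1, 'azzurro': 2, 'arancio': 3, 'rosso': 4}
--     if colore not in rank:
--         return 0
--     r = rank[colore]
--     return sum(v for k, v in attesa.items() if rank.get(k, -1) > r)
-- ===== Notes on version B (the rewrite author's own statement) =====
-- stated objective: alternative
-- what changed: Instead of A's four per-color branches each looping over a slice of the severity scale and indexing into the dict, B makes a single pass over the attesa items themselves, summing the values whose key's rank (looked up in a rank table) is strictly above the rank of colore.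
import Mathlib
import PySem

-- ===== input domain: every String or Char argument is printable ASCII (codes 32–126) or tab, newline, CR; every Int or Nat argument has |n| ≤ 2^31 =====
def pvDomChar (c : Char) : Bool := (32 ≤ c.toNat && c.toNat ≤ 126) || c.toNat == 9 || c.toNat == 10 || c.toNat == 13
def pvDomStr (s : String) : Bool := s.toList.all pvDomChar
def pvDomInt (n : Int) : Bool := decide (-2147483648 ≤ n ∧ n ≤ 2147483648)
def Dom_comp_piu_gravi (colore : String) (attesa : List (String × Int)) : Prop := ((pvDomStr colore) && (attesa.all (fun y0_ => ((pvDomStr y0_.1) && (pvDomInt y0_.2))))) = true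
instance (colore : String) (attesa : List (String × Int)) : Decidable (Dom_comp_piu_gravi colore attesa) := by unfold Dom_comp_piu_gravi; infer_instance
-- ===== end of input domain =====

-- B makes one pass over the attesa items, summing values whose key's rank is strictly above colore's rank,
-- instead of A's four branches each looping over a slice of the severity scale (alternative; not faster).

-- ===== PORT A =====
-- attesa[c] raises KeyError on a missing key; Pre_ excludes those inputs, so the getD 0 fallback is never taken inside Pre_.
def comp_piu_gravi (colore : String) (attesa : List (String × Int)) : Int :=
  let col_list : List String := ["verde", "azzurro", "arancio", "rosso"]
  let res : Int := 0
  if colore = "bianco" then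
    col_list.foldl (fun r c => r + ((PySem.Dict.mk attesa).get? c).getD 0) res
  else if colore = "verde" then
    (col_list.drop 1).foldl (fun r c => r + ((PySem.Dict.mk attesa).get? c).getD 0) res
  else if colore = "azzurro" then
    (col_list.drop 2).foldl (fun r c => r + ((PySem.Dict.mk attesa).get? c).getD 0) res
  else if colore = "arancio" then
    res + ((PySem.Dict.mk attesa).get? "rosso").getD 0
  else
    res

-- ===== PORT B =====
def pvRank : PySem.Dict String Int :=
  PySem.Dict.mk [("bianco", 0), ("verde", 1), ("azzurro", 2), ("arancio", 3), ("rosso", 4)]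

def comp_piu_gravi_alt (colore : String) (attesa : List (String × Int)) : Int :=
  match pvRank.get? colore with
  | none => 0
  | some r => attesa.foldl (fun s kv => if pvRank.getD kv.1 (-1) > r then s + kv.2 else s) 0

-- ===== PRECONDITION & SPEC =====
-- The keys A actually reads for this colore (the strictly-more-severe colors).
def pvNeededKeys (colore : String) : List String :=
  if colore = "bianco" then ["verde", "azzurro", "arancio", "rosso"]
  else if colore = "verde" then ["azzurro", "arancio", "rosso"]
  else if colore = "azzurro" then ["arancio", "rosso"]
  else if colore = "arancio" then ["rosso"]
  else []

-- Pre_ excludes exactly the inputs where Python A raises KeyError (a strictly-more-severe color absent from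
-- attesa); the Nodup clause only states what is automatic for attesa, which is a Python dict (unique keys).
def Pre_comp_piu_gravi (colore : String) (attesa : List (String × Int)) : Prop :=
  (attesa.map Prod.fst).Nodup ∧ ∀ c ∈ pvNeededKeys colore, c ∈ attesa.map Prod.fst
instance (colore : String) (attesa : List (String × Int)) : Decidable (Pre_comp_piu_gravi colore attesa) := by unfold Pre_comp_piu_gravi; infer_instance

def pvWitness_comp_piu_gravi : String × (List (String × Int)) :=
  ("verde", [("verde", 3), ("azzurro", 1), ("arancio", 0), ("rosso", 2)])

def Spec_comp_piu_gravi (colore : String) (attesa : List (String × Int)) (out : Int) : Prop := out = comp_piu_gravi_alt colore attesa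
instance (colore : String) (attesa : List (String × Int)) (out : Int) : Decidable (Spec_comp_piu_gravi colore attesa out) := by unfold Spec_comp_piu_gravi; infer_instance

-- ===== CLAIM (what is proved, stated in full; the proofs are below) =====
def Claim_equal_comp_piu_gravi : Prop := ∀ (colore : String) (attesa : List (String × Int)), Dom_comp_piu_gravi colore attesa → Pre_comp_piu_gravi colore attesa → Spec_comp_piu_gravi colore attesa (comp_piu_gravi colore attesa)

-- ===== LEMMAS AND PROOFS =====

-- An if-accumulate foldl is init plus the sum of the selected values.
theorem pv_foldl_if_sum (l : List (String × Int)) (p : String → Bool) (init : Int) :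
    l.foldl (fun s kv => if p kv.1 then s + kv.2 else s) init
      = init + ((l.filter (fun kv => p kv.1)).map Prod.snd).sum := by
  induction l generalizing init with
  | nil => simp
  | cons kv t ih =>
    by_cases h : p kv.1 = true <;> simp [h, ih] <;> ring

-- Splitting a disjunctive filter into two disjoint filters splits the sum.
theorem pv_sum_filter_or (l : List (String × Int)) (p q : String → Bool)
    (hdisj : ∀ k, ¬ (p k = true ∧ q k = true)) :
    ((l.filter (fun kv => p kv.1 || q kv.1)).map Prod.snd).sum
      = ((l.filter (fun kv => p kv.1)).map Prod.snd).sum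
        + ((l.filter (fun kv => q kv.1)).map Prod.snd).sum := by
  induction l with
  | nil => simp
  | cons kv t ih =>
    by_cases hp : p kv.1 = true
    · have hq : q kv.1 = false := by
        by_contra h
        exact hdisj kv.1 ⟨hp, by revert h; cases q kv.1 <;> simp⟩
      simp [hp, hq, ih]
      ring
    · have hp' : p kv.1 = false := by revert hp; cases p kv.1 <;> simp
      by_cases hq : q kv.1 = true <;> simp [hp', hq, ih] <;> ring

-- With nodup keys and the key present, the filter on that key holds exactly its dict value.
theorem pv_sum_filter_single (l : List (String × Int)) (c : String)
    (hnd : (l.map Prod.fst).Nodup) (hmem : c ∈ l.map Prod.fst) :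
    ((l.filter (fun kv => kv.1 == c)).map Prod.snd).sum
      = ((PySem.Dict.mk l).get? c).getD 0 := by
  induction l with
  | nil => simp at hmem
  | cons kv t ih =>
    obtain ⟨k, v⟩ := kv
    simp only [List.map_cons, List.nodup_cons] at hnd
    by_cases hk : k = c
    · subst hk
      have hfil : t.filter (fun kv' => kv'.1 == k) = [] := by
        apply List.filter_eq_nil_iff.mpr
        rintro ⟨k', v'⟩ hx h
        simp only [beq_iff_eq] at h
        subst h
        exact hnd.1 (List.mem_map.mpr ⟨(k', v'), hx, rfl⟩)
      simp [PySem.Dict.get?_mk_cons, hfil]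
    · have hmem' : c ∈ t.map Prod.fst := by
        simp only [List.map_cons, List.mem_cons] at hmem
        rcases hmem with h | h
        · exact absurd h.symm hk
        · exact h
      have hbeq : (k == c) = false := by simpa using hk
      rw [List.filter_cons, PySem.Dict.get?_mk_cons]
      simp only [hbeq, Bool.false_eq_true]
      simpa [hbeq] using ih hnd.2 hmem'

-- Master lemma: a membership-filtered pass over the data equals a loop over the needed keys.
theorem pv_fold_mem_eq_keys (S : List String) (l : List (String × Int))
    (hS : S.Nodup) (hnd : (l.map Prod.fst).Nodup)
    (hall : ∀ c ∈ S, c ∈ l.map Prod.fst) :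
    l.foldl (fun s kv => if kv.1 ∈ S then s + kv.2 else s) 0
      = S.foldl (fun r c => r + ((PySem.Dict.mk l).get? c).getD 0) 0 := by
  induction S with
  | nil => simp
  | cons c S' ih =>
    simp only [List.nodup_cons] at hS
    have hrhs : (c :: S').foldl (fun r c => r + ((PySem.Dict.mk l).get? c).getD 0) 0
        = ((PySem.Dict.mk l).get? c).getD 0
          + S'.foldl (fun r c => r + ((PySem.Dict.mk l).get? c).getD 0) 0 := by
      simp only [List.foldl_cons, Int.zero_add, PySem.List.foldl_add]
    rw [hrhs, ← ih hS.2 (fun x hx => hall x (List.mem_cons_of_mem _ hx))]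
    have hfun : (fun (s : Int) (kv : String × Int) => if kv.1 ∈ c :: S' then s + kv.2 else s)
        = fun s kv => if ((kv.1 == c) || decide (kv.1 ∈ S')) = true then s + kv.2 else s := by
      funext s kv
      by_cases h : kv.1 ∈ c :: S' <;> simp only [List.mem_cons] at h <;>
        simp [h, List.mem_cons]
    have hfun' : (fun (s : Int) (kv : String × Int) => if kv.1 ∈ S' then s + kv.2 else s)
        = fun s kv => if (decide (kv.1 ∈ S')) = true then s + kv.2 else s := by
      funext s kv; simp
    rw [hfun, hfun',
      pv_foldl_if_sum l (fun k => (k == c) || decide (k ∈ S')) 0,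
      pv_foldl_if_sum l (fun k => decide (k ∈ S')) 0,
      pv_sum_filter_or l (fun k => k == c) (fun k => decide (k ∈ S'))
        (by
          intro k hk
          simp only [beq_iff_eq, decide_eq_true_eq] at hk
          obtain ⟨h1, h2⟩ := hk
          subst h1
          exact hS.1 h2)]
    rw [pv_sum_filter_single l c hnd (hall c List.mem_cons_self)]
    ring

-- Rank table lookup as an if-chain over the five colors.
theorem pv_getD_rank (k : String) :
    pvRank.getD k (-1)
      = if k = "bianco" then 0 else if k = "verde" then 1 else if k = "azzurro" then 2
        else if k = "arancio" then 3 else if k = "rosso" then 4 else -1 := by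
  simp only [pvRank, PySem.Dict.getD_eq_get?_getD, PySem.Dict.get?_mk_cons]
  split_ifs with h0 h1 h2 h3 h4 <;>
    simp_all [PySem.Dict.get?]

-- B's rank test equals membership in the given key set (instantiated per colore).
theorem pv_pred_eq_mem (r : Int) (S : List String)
    (hb : ((0:Int) > r) ↔ "bianco" ∈ S) (hv : ((1:Int) > r) ↔ "verde" ∈ S)
    (ha : ((2:Int) > r) ↔ "azzurro" ∈ S) (hr : ((3:Int) > r) ↔ "arancio" ∈ S)
    (hro : ((4:Int) > r) ↔ "rosso" ∈ S) (hneg : ¬ ((-1:Int) > r))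
    (hSsub : ∀ k ∈ S, k ∈ ["bianco", "verde", "azzurro", "arancio", "rosso"]) :
    (fun (s : Int) (kv : String × Int) => if pvRank.getD kv.1 (-1) > r then s + kv.2 else s)
      = fun s kv => if kv.1 ∈ S then s + kv.2 else s := by
  funext s kv
  rw [pv_getD_rank]
  by_cases h0 : kv.1 = "bianco"
  · simp [h0, hb]
  by_cases h1 : kv.1 = "verde"
  · simp [h1, hv]
  by_cases h2 : kv.1 = "azzurro"
  · simp [h2, ha]
  by_cases h3 : kv.1 = "arancio"
  · simp [h3, hr]
  by_cases h4 : kv.1 = "rosso"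
  · simp [h4, hro]
  · have hnm : kv.1 ∉ S := fun hm => by
      have := hSsub kv.1 hm
      simp [h0, h1, h2, h3, h4] at this
    simp [h0, h1, h2, h3, h4, hneg, hnm]

-- ===== VERDICT (by name: the statement is the Claim_ definition above) =====
theorem comp_piu_gravi_spec : Claim_equal_comp_piu_gravi := by
  intro colore attesa _ hpre
  obtain ⟨hnd, hall⟩ := hpre
  unfold Spec_comp_piu_gravi comp_piu_gravi comp_piu_gravi_alt
  by_cases h0 : colore = "bianco"
  · subst h0
    have hget : pvRank.get? "bianco" = some 0 := by decide
    rw [hget]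
    simp only []
    rw [pv_pred_eq_mem 0 ["verde", "azzurro", "arancio", "rosso"]
        (by decide) (by decide) (by decide) (by decide) (by decide) (by decide) (by decide),
      pv_fold_mem_eq_keys _ attesa (by decide) hnd
        (by simpa [pvNeededKeys] using hall)]
    simp
  by_cases h1 : colore = "verde"
  · subst h1
    have hget : pvRank.get? "verde" = some 1 := by decide
    rw [hget]
    simp only [if_neg h0, List.drop]
    rw [pv_pred_eq_mem 1 ["azzurro", "arancio", "rosso"]
        (by decide) (by decide) (by decide) (by decide) (by decide) (by decide) (by decide),
      pv_fold_mem_eq_keys _ attesa (by decide) hnd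
        (by simpa [pvNeededKeys, h0] using hall)]
    simp
  by_cases h2 : colore = "azzurro"
  · subst h2
    have hget : pvRank.get? "azzurro" = some 2 := by decide
    rw [hget]
    simp only [if_neg h0, if_neg h1, List.drop]
    rw [pv_pred_eq_mem 2 ["arancio", "rosso"]
        (by decide) (by decide) (by decide) (by decide) (by decide) (by decide) (by decide),
      pv_fold_mem_eq_keys _ attesa (by decide) hnd
        (by simpa [pvNeededKeys, h0, h1] using hall)]
    simp
  by_cases h3 : colore = "arancio"
  · subst h3
    have hget : pvRank.get? "arancio" = some 3 := by decide
    rw [hget]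
    simp only [if_neg h0, if_neg h1, if_neg h2]
    rw [pv_pred_eq_mem 3 ["rosso"]
        (by decide) (by decide) (by decide) (by decide) (by decide) (by decide) (by decide),
      pv_fold_mem_eq_keys _ attesa (by decide) hnd
        (by simpa [pvNeededKeys, h0, h1, h2] using hall)]
    simp
  by_cases h4 : colore = "rosso"
  · subst h4
    have hget : pvRank.get? "rosso" = some 4 := by decide
    rw [hget]
    simp only [if_neg h0, if_neg h1, if_neg h2, if_neg h3]
    rw [pv_pred_eq_mem 4 []
        (by decide) (by decide) (by decide) (by decide) (by decide) (by decide) (by decide)]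
    simp
  · have hget : pvRank.get? colore = none := by
      have e0 : ("bianco" == colore) = false := by simpa using Ne.symm h0
      have e1 : ("verde" == colore) = false := by simpa using Ne.symm h1
      have e2 : ("azzurro" == colore) = false := by simpa using Ne.symm h2
      have e3 : ("arancio" == colore) = false := by simpa using Ne.symm h3
      have e4 : ("rosso" == colore) = false := by simpa using Ne.symm h4
      simp [pvRank, PySem.Dict.get?, List.find?, e0, e1, e2, e3, e4]
    rw [hget]
    simp [h0, h1, h2, h3]
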